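-- pv_equiv track=rewrite | github.com/diksha2112/Projects | Projects/AML Project/Task1/bagging/decision_Tree_Boosting_run.py | weighted_prediction
-- ===== SOURCE A (Python) =====
-- def weighted_prediction(prediction_list):
--     t=[]
--     for col in range(0,len(prediction_list[0])):
--         column=[]
--         for temp in prediction_list:
--             c=temp[col]
--             column.append(c)
--
--             tp=sum(column)
--
--             if tp>=0:
--                 t.append('1')
--             else:
--                 t.append('-1')
--     return t
-- ===== SOURCE B (Python) =====
-- def weighted_prediction(prediction_list):
--     def signs(column):
--         sums = []
--         s = 0
--         for x in column:
--             s += x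
--             sums.append(s)
--         return ['1' if v >= 0 else '-1' for v in sums]
--     return [lab for col in zip(*prediction_list) for lab in signs(col)]
-- ===== Notes on version B (the rewrite author's own statement) =====
-- stated objective: faster
-- what changed: B first transposes the matrix with zip(*...), then for each column builds its prefix sums in one running-sum pass and maps them to sign labels, instead of A's re-summing of a growing prefix list inside the inner loop.
import Mathlib
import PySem

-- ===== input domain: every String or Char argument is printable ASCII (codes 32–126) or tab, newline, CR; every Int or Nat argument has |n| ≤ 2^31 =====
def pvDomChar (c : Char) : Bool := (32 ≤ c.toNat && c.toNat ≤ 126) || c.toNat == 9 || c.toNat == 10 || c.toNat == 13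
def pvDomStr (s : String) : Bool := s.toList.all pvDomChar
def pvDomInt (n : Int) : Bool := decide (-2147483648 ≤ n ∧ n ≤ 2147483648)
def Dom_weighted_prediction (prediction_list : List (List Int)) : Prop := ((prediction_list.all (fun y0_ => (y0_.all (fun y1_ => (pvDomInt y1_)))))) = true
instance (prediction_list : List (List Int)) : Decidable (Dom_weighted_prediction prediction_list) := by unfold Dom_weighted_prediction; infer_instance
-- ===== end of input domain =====

-- B transposes once with zip(*...) and emits each column's prefix-sum signs in one running pass,
-- instead of A's per-row rebuild-and-resum of the growing column prefix (asymptotically faster).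

-- ===== PORT A =====
-- outer loop over column indices; inner loop state: (column so far, output list t); tp = sum(column) recomputed each row, as in A
def weighted_prediction (prediction_list : List (List Int)) : List String :=
  (PySem.List.pyRange 0 (((PySem.List.pyGet? prediction_list 0).getD []).length : Int) 1).foldl
    (fun t col =>
      (prediction_list.foldl
        (fun (p : List Int × List String) temp =>
          let c := (PySem.List.pyGet? temp col).getD 0
          let column := p.1 ++ [c]
          let tp := column.sum
          (column, p.2 ++ [if tp ≥ 0 then "1" else "-1"]))
        ([], t)).2)
    []

-- ===== PORT B =====
-- hand port of Python's zip(*rows): columns until the shortest row runs out (exact: zip stops at the first exhausted iterator)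
def pvZipStar : List (List Int) → List (List Int)
  | [] => []
  | r :: rs =>
      if (r :: rs).any List.isEmpty then []
      else (r.headD 0 :: rs.map (fun row => row.headD 0)) :: pvZipStar (r.tail :: rs.map (fun row => row.tail))
  termination_by pl => (pl.headD []).length
  decreasing_by
    rename_i h
    simp only [List.any_cons, Bool.or_eq_true] at h
    have hr : r ≠ [] := by intro he; subst he; simp at h
    simp only [List.headD_cons]
    cases r with
    | nil => exact absurd rfl hr
    | cons a b => simp

-- signs(column): the running-sum list `sums`, then the label comprehension over it
def pvPrefixSums (s : Int) : List Int → List Int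
  | [] => []
  | x :: xs => (s + x) :: pvPrefixSums (s + x) xs

def pvSigns (column : List Int) : List String :=
  (pvPrefixSums 0 column).map (fun v => if v ≥ 0 then "1" else "-1")

def weighted_prediction_alt (prediction_list : List (List Int)) : List String :=
  (pvZipStar prediction_list).flatMap pvSigns

-- ===== PRECONDITION & SPEC =====
-- Pre_ excludes exactly the inputs where Python A raises IndexError: the empty list
-- (prediction_list[0]) and ragged inputs where some row is shorter than the first row (temp[col]).
def Pre_weighted_prediction (prediction_list : List (List Int)) : Prop :=
  prediction_list ≠ [] ∧ ∀ row ∈ prediction_list, (prediction_list.headD []).length ≤ row.length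
instance (prediction_list : List (List Int)) : Decidable (Pre_weighted_prediction prediction_list) := by
  unfold Pre_weighted_prediction; infer_instance
def pvWitness_weighted_prediction : List (List Int) := [[1, -2], [3, 4]]
def Spec_weighted_prediction (prediction_list : List (List Int)) (out : List String) : Prop := out = weighted_prediction_alt prediction_list
instance (prediction_list : List (List Int)) (out : List String) : Decidable (Spec_weighted_prediction prediction_list out) := by unfold Spec_weighted_prediction; infer_instance

-- ===== CLAIM (what is proved, stated in full; the proofs are below) =====
def Claim_equal_weighted_prediction : Prop := ∀ (prediction_list : List (List Int)), Dom_weighted_prediction prediction_list → Pre_weighted_prediction prediction_list → Spec_weighted_prediction prediction_list (weighted_prediction prediction_list)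

-- ===== LEMMAS AND PROOFS =====

-- A's inner loop appends exactly the sign labels of the prefix sums of the column it gathers
theorem innerA_eq (pl : List (List Int)) (col : Int) (column : List Int) (t : List String) :
    (pl.foldl
        (fun (p : List Int × List String) temp =>
          let c := (PySem.List.pyGet? temp col).getD 0
          let column := p.1 ++ [c]
          let tp := column.sum
          (column, p.2 ++ [if tp ≥ 0 then "1" else "-1"]))
        (column, t)).2
      = t ++ (pvPrefixSums column.sum (pl.map (fun row => (PySem.List.pyGet? row col).getD 0))).map
              (fun v => if v ≥ 0 then "1" else "-1") := by
  induction pl generalizing column t with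
  | nil => simp [pvPrefixSums]
  | cons row rest ih =>
      simp only [List.foldl_cons, List.map_cons, pvPrefixSums]
      rw [ih]
      simp [List.sum_append]

-- under Pre_, pvZipStar is the list of columns indexed 0 .. len(first row) - 1
theorem zipStar_eq (r : List Int) (rs : List (List Int))
    (h : ∀ row ∈ (r :: rs), r.length ≤ row.length) :
    pvZipStar (r :: rs)
      = (List.range r.length).map (fun i => (r :: rs).map (fun row => row.getD i 0)) := by
  induction r generalizing rs with
  | nil => simp [pvZipStar]
  | cons x r' ih =>
      have hrows : ∀ row ∈ rs, row ≠ [] := by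
        intro row hm
        have := h row (List.mem_cons_of_mem _ hm)
        intro he; subst he; simp at this
      have hany : ((x :: r') :: rs).any List.isEmpty = false := by
        simp only [List.any_eq_false]
        intro row hm
        rcases List.mem_cons.mp hm with rfl | hm
        · simp
        · simp [List.isEmpty_iff, hrows row hm]
      rw [pvZipStar.eq_def]
      simp only [hany, Bool.false_eq_true, if_false, List.headD_cons, List.tail_cons]
      have h' : ∀ row ∈ (r' :: rs.map (fun row => row.tail)), r'.length ≤ row.length := by
        intro row hm
        rcases List.mem_cons.mp hm with he | hm
        · subst he; exact le_refl _
        · rcases List.mem_map.mp hm with ⟨row0, hrow0, rfl⟩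
          have := h row0 (List.mem_cons_of_mem _ hrow0)
          simp at this ⊢; omega
      rw [ih (rs.map (fun row => row.tail)) h']
      rw [List.length_cons, List.range_succ_eq_map]
      simp only [List.map_cons, List.map_map, List.getD_cons_zero]
      congr 1
      · congr 1
        apply List.map_congr_left
        intro row _
        cases row <;> simp [List.getD]
      · apply List.map_congr_left
        intro i _
        simp only [Function.comp_apply, List.getD_cons_succ]
        congr 1
        apply List.map_congr_left
        intro row _
        cases row <;> simp [List.getD]

theorem weighted_prediction_eq (pl : List (List Int)) (hpre : Pre_weighted_prediction pl) :
    weighted_prediction pl = weighted_prediction_alt pl := by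
  obtain ⟨hne, hlen⟩ := hpre
  obtain ⟨r, rs, rfl⟩ : ∃ r rs, pl = r :: rs := by
    cases pl with
    | nil => exact absurd rfl hne
    | cons a b => exact ⟨a, b, rfl⟩
  simp only [List.headD_cons] at hlen
  unfold weighted_prediction weighted_prediction_alt
  rw [zipStar_eq r rs hlen]
  simp only [PySem.List.pyGet?_zero_cons, Option.getD_some]
  have hbody : ∀ (t : List String) (col : Int),
      ((r :: rs).foldl
        (fun (p : List Int × List String) temp =>
          let c := (PySem.List.pyGet? temp col).getD 0
          let column := p.1 ++ [c]
          let tp := column.sum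
          (column, p.2 ++ [if tp ≥ 0 then "1" else "-1"]))
        ([], t)).2
      = t ++ pvSigns ((r :: rs).map (fun row => (PySem.List.pyGet? row col).getD 0)) := by
    intro t col
    simpa [pvSigns] using innerA_eq (r :: rs) col [] t
  have hfold :
      (PySem.List.pyRange 0 (r.length : Int) 1).foldl
        (fun t col =>
          ((r :: rs).foldl
            (fun (p : List Int × List String) temp =>
              let c := (PySem.List.pyGet? temp col).getD 0
              let column := p.1 ++ [c]
              let tp := column.sum
              (column, p.2 ++ [if tp ≥ 0 then "1" else "-1"]))
            ([], t)).2) []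
      = (PySem.List.pyRange 0 (r.length : Int) 1).foldl
          (fun t col => t ++ pvSigns ((r :: rs).map (fun row => (PySem.List.pyGet? row col).getD 0))) [] := by
    congr 1
    funext t col
    exact hbody t col
  rw [hfold, PySem.List.foldl_append_eq_flatMap]
  rw [PySem.List.pyRange_zero_nat, List.flatMap_map, List.flatMap_map]
  simp only [List.nil_append]
  congr 1
  funext i
  simp [pvSigns, List.getD_eq_getElem?_getD]


-- ===== VERDICT (by name: the statement is the Claim_ definition above) =====
theorem weighted_prediction_spec : Claim_equal_weighted_prediction := by
  intro pl _ hpre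
  unfold Spec_weighted_prediction
  exact weighted_prediction_eq pl hpre
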